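-- pv_equiv track=rewrite | github.com/igibmukeshkumar/aiims-clinical-report-summary | llm_app.py | _select_quality_model
-- ===== SOURCE A (Python) =====
-- from typing import List, Optional, Tuple, Dict
--
-- def _select_quality_model(models: List[str]) -> Optional[str]:
--     if not models:
--         return None
--     # Prefer largest parameter sizes for quality.
--     preferred_sizes = ["70b", "65b", "34b", "33b", "30b", "13b", "8b", "7b", "3b"]
--     lowered = [m.lower() for m in models]
--     for size in preferred_sizes:
--         for i, name in enumerate(lowered):
--             if size in name:
--                 return models[i]
--     return models[0]
-- ===== SOURCE B (Python) =====
-- from typing import List, Optional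
--
-- def _select_quality_model(models: List[str]) -> Optional[str]:
--     if not models:
--         return None
--     preferred_sizes = ["70b", "65b", "34b", "33b", "30b", "13b", "8b", "7b", "3b"]
--     sentinel = len(preferred_sizes)
--     best_rank = sentinel
--     best = models[0]
--     for m in models:
--         low = m.lower()
--         rank = next((i for i, s in enumerate(preferred_sizes) if s in low), sentinel)
--         if rank < best_rank:
--             best_rank = rank
--             best = m
--     return best
-- ===== Notes on version B (the rewrite author's own statement) =====
-- stated objective: alternative
-- what changed: Single pass over the models that scores each by the index of the first matching preferred size (sentinel if none) and keeps the earliest model with a strictly smallest rank, instead of rescanning the whole model list once per preferred size.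
import Mathlib
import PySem

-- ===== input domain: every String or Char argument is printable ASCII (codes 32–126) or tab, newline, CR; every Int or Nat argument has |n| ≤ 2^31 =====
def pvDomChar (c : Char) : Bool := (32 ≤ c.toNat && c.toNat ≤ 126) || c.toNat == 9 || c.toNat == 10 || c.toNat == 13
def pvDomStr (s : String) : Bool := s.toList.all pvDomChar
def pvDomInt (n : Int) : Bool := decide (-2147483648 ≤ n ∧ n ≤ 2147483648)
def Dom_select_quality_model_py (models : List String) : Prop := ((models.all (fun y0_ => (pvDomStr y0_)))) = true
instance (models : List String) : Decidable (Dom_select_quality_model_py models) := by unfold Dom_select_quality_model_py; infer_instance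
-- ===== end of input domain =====

-- B replaces A's size-by-size rescan of the model list by one pass that ranks each
-- model by its first matching preferred size and keeps the earliest best-ranked model.

-- ===== PORT A =====
def pvSizes : List String := ["70b", "65b", "34b", "33b", "30b", "13b", "8b", "7b", "3b"]

-- inner loop: for i, name in enumerate(lowered): if size in name: return models[i]
def pvInnerA (size : String) (models : List String) : List (Int × String) → Option String
  | [] => none
  | (i, name) :: rest =>
    if PySem.Str.isIn size name then some (PySem.List.pyGetD models i "")
    else pvInnerA size models rest

-- outer loop over preferred_sizes
def pvOuterA (models lowered : List String) : List String → Option String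
  | [] => none
  | size :: rest =>
    match pvInnerA size models (PySem.List.enumerate lowered 0) with
    | some m => some m
    | none => pvOuterA models lowered rest

def select_quality_model_py (models : List String) : Option String :=
  if models.isEmpty then none
  else
    let lowered := models.map PySem.Str.lower
    match pvOuterA models lowered pvSizes with
    | some m => some m
    | none => some (PySem.List.pyGetD models 0 "")

-- ===== PORT B =====
-- one fold step: score the model, keep it only on a strictly smaller rank
def pvStep (st : Nat × String) (m : String) : Nat × String :=
  let low := PySem.Str.lower m
  let rank := pvSizes.findIdx (fun s => PySem.Str.isIn s low)
  if rank < st.1 then (rank, m) else st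

def select_quality_model_py_alt (models : List String) : Option String :=
  match models with
  | [] => none
  | m0 :: _ => some (models.foldl pvStep (pvSizes.length, m0)).2

-- ===== PRECONDITION & SPEC =====
def Spec_select_quality_model_py (models : List String) (out : Option String) : Prop := out = select_quality_model_py_alt models
instance (models : List String) (out : Option String) : Decidable (Spec_select_quality_model_py models out) := by unfold Spec_select_quality_model_py; infer_instance

-- ===== CLAIM (what is proved, stated in full; the proofs are below) =====
def Claim_equal_select_quality_model_py : Prop := ∀ (models : List String), Dom_select_quality_model_py models → Spec_select_quality_model_py models (select_quality_model_py models)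

-- ===== LEMMAS AND PROOFS =====

-- p s m: size s occurs in the lowercased model m
def pvP (s m : String) : Bool := PySem.Str.isIn s (PySem.Str.lower m)

-- rank of a model w.r.t. a list of sizes
def pvRk (sizes : List String) (m : String) : Nat := sizes.findIdx (fun s => pvP s m)

-- minimum rank over the models, seeded with the sentinel
def pvK (sizes : List String) (models : List String) : Nat :=
  (models.map (pvRk sizes)).foldl min sizes.length

theorem pv_foldl_min_le (l : List Nat) (a : Nat) : l.foldl min a ≤ a := by
  induction l generalizing a with
  | nil => simp
  | cons x xs ih => exact le_trans (ih _) (min_le_left _ _)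

theorem pv_foldl_min_le_mem (l : List Nat) (a x : Nat) (hx : x ∈ l) : l.foldl min a ≤ x := by
  induction l generalizing a with
  | nil => simp at hx
  | cons y ys ih =>
    rcases List.mem_cons.mp hx with rfl | h
    · exact le_trans (pv_foldl_min_le ys _) (min_le_right _ _)
    · exact ih _ h

theorem pv_foldl_min_attained (l : List Nat) (a : Nat) :
    l.foldl min a = a ∨ l.foldl min a ∈ l := by
  induction l generalizing a with
  | nil => exact Or.inl rfl
  | cons x xs ih =>
    rcases ih (min a x) with h | h
    · rcases Nat.le_total a x with h1 | h1
      · rw [min_eq_left h1] at h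
        exact Or.inl (by rw [List.foldl_cons, min_eq_left h1]; exact h)
      · rw [min_eq_right h1] at h
        exact Or.inr (by simp [List.foldl, min_eq_right h1, h])
    · exact Or.inr (List.mem_cons_of_mem _ h)

theorem pv_foldl_min_succ (l : List Nat) (a : Nat) :
    (l.map (· + 1)).foldl min (a + 1) = l.foldl min a + 1 := by
  induction l generalizing a with
  | nil => rfl
  | cons x xs ih => simpa [Nat.succ_min_succ] using ih (min a x)

theorem pv_find?_congr_mem {α : Type} (l : List α) (p q : α → Bool)
    (h : ∀ x ∈ l, p x = q x) : l.find? p = l.find? q := by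
  induction l with
  | nil => rfl
  | cons x xs ih =>
    have hx := h x (List.mem_cons_self ..)
    by_cases hp : p x = true
    · rw [List.find?_cons_of_pos hp, List.find?_cons_of_pos (hx ▸ hp)]
    · rw [List.find?_cons_of_neg hp, List.find?_cons_of_neg (hx ▸ hp)]
      exact ih fun y hy => h y (List.mem_cons_of_mem _ hy)

-- A's inner loop is find? over the models
theorem pv_inner_eq (s : String) (pre suf : List String) :
    pvInnerA s (pre ++ suf) (PySem.List.enumerate (suf.map PySem.Str.lower) (pre.length : Int)) =
      suf.find? (pvP s) := by
  induction suf generalizing pre with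
  | nil => rfl
  | cons m rest ih =>
    simp only [List.map_cons, PySem.List.enumerate_cons, pvInnerA]
    by_cases hp : pvP s m = true
    · rw [List.find?_cons_of_pos hp]
      simp only [pvP] at hp
      rw [if_pos hp]
      have hg : List.getD (pre ++ m :: rest) pre.length "" = m := by
        simp [List.getD_eq_getElem?_getD]
      simp [PySem.List.pyGetD_natCast]
    · rw [List.find?_cons_of_neg hp]
      simp only [pvP] at hp
      rw [if_neg hp]
      have h1 : (pre.length : Int) + 1 = ((pre ++ [m]).length : Int) := by
        simp
      have h2 : pre ++ m :: rest = (pre ++ [m]) ++ rest := by simp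
      rw [h1, h2, ih (pre ++ [m])]

theorem pv_inner_eq' (s : String) (models : List String) :
    pvInnerA s models (PySem.List.enumerate (models.map PySem.Str.lower) 0) =
      models.find? (pvP s) := by
  simpa using pv_inner_eq s [] models

-- A's outer loop: first model of minimal rank, if any size matches at all
theorem pv_outer_eq (sizes models : List String) :
    pvOuterA models (models.map PySem.Str.lower) sizes =
      if pvK sizes models < sizes.length then
        models.find? (fun m => pvRk sizes m == pvK sizes models)
      else none := by
  induction sizes with
  | nil => simp [pvOuterA]
  | cons s rest ih =>
    simp only [pvOuterA, pv_inner_eq']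
    rcases hf : models.find? (pvP s) with _ | m
    · -- no model contains s
      have hnone : ∀ m ∈ models, pvP s m = false := by
        intro m hm
        by_contra h
        have := List.find?_eq_none.mp hf m hm
        simp_all
      have hrk : ∀ m ∈ models, pvRk (s :: rest) m = pvRk rest m + 1 := by
        intro m hm
        simp [pvRk, List.findIdx_cons, hnone m hm]
      have hmap : models.map (pvRk (s :: rest)) = (models.map (pvRk rest)).map (· + 1) := by
        simp only [List.map_map]
        exact List.map_congr_left fun m hm => by simp [hrk m hm]
      have hK : pvK (s :: rest) models = pvK rest models + 1 := by
        simp only [pvK, hmap, List.length_cons]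
        exact pv_foldl_min_succ _ _
      rw [ih, hK]
      have hc : pvK rest models + 1 < rest.length + 1 ↔ pvK rest models < rest.length := by omega
      simp only [List.length_cons, hc]
      split_ifs with h
      · exact pv_find?_congr_mem _ _ _ fun m hm => by
          simp [hrk m hm]
      · rfl
    · -- some model contains s: minimal rank is 0
      have hpm : pvP s m = true := List.find?_some hf
      have hmm : m ∈ models := List.mem_of_find?_eq_some hf
      have hK : pvK (s :: rest) models = 0 := by
        have h0 : pvRk (s :: rest) m = 0 := by simp [pvRk, List.findIdx_cons, hpm]
        have hle := pv_foldl_min_le_mem (models.map (pvRk (s :: rest))) (s :: rest).length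
          (pvRk (s :: rest) m) (List.mem_map.mpr ⟨m, hmm, rfl⟩)
        rw [h0] at hle
        simpa [pvK] using Nat.le_zero.mp hle
      have hlt : pvK (s :: rest) models < (s :: rest).length := by simp [hK]
      rw [if_pos hlt, hK]
      have hpred : (fun m => pvRk (s :: rest) m == 0) = pvP s := by
        funext x
        by_cases h : pvP s x = true <;> simp [pvRk, List.findIdx_cons, h]
      rw [hpred, hf]

-- B's fold: minimum rank so far, and the first model that strictly improved on the seed
theorem pv_fold_eq (models : List String) (r0 : Nat) (b0 : String) :
    models.foldl pvStep (r0, b0) =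
      ((models.map (pvRk pvSizes)).foldl min r0,
        if (models.map (pvRk pvSizes)).foldl min r0 < r0 then
          ((models.find? (fun m => pvRk pvSizes m == (models.map (pvRk pvSizes)).foldl min r0)).getD b0)
        else b0) := by
  induction models generalizing r0 b0 with
  | nil => simp
  | cons m rest ih =>
    have hstep : pvStep (r0, b0) m =
        if pvRk pvSizes m < r0 then (pvRk pvSizes m, m) else (r0, b0) := by
      simp [pvStep, pvRk, pvP]
    simp only [List.foldl_cons, List.map_cons, hstep]
    by_cases h : pvRk pvSizes m < r0
    · rw [if_pos h]
      rw [ih]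
      have hmin : min r0 (pvRk pvSizes m) = pvRk pvSizes m := min_eq_right h.le
      set K1 := (rest.map (pvRk pvSizes)).foldl min (pvRk pvSizes m) with hK1
      have hle : K1 ≤ pvRk pvSizes m := pv_foldl_min_le _ _
      simp only [hmin, ← hK1]
      have hlt : K1 < r0 := lt_of_le_of_lt hle h
      rw [if_pos hlt]
      rcases eq_or_lt_of_le hle with heq | hltm
      · -- the new model itself attains the minimum
        rw [if_neg (by omega)]
        rw [List.find?_cons_of_pos (by simp [heq])]
        simp
      · -- minimum attained strictly later
        rw [if_pos hltm]
        rw [List.find?_cons_of_neg (by simp; omega)]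
        have hattained : K1 ∈ rest.map (pvRk pvSizes) := by
          rcases pv_foldl_min_attained (rest.map (pvRk pvSizes)) (pvRk pvSizes m) with he | he
          · omega
          · exact he
        rcases List.mem_map.mp hattained with ⟨x, hx, hxk⟩
        have hsome : (rest.find? (fun m => pvRk pvSizes m == K1)).isSome := by
          rw [List.find?_isSome]
          exact ⟨x, hx, by simp [hxk]⟩
        rcases Option.isSome_iff_exists.mp hsome with ⟨y, hy⟩
        simp [hy]
    · rw [if_neg h]
      rw [ih]
      have hmin : min r0 (pvRk pvSizes m) = r0 := min_eq_left (by omega)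
      set K1 := (rest.map (pvRk pvSizes)).foldl min r0 with hK1
      simp only [hmin, ← hK1]
      by_cases hlt : K1 < r0
      · rw [if_pos hlt, if_pos hlt]
        have hK1le : K1 ≤ r0 := pv_foldl_min_le _ _
        rw [List.find?_cons_of_neg (by simp; omega)]
      · rw [if_neg hlt, if_neg hlt]

-- ===== VERDICT (by name: the statement is the Claim_ definition above) =====
theorem select_quality_model_py_spec : Claim_equal_select_quality_model_py := by
  intro models _
  unfold Spec_select_quality_model_py
  match models with
  | [] => rfl
  | m0 :: rest =>
    simp only [select_quality_model_py, select_quality_model_py_alt, List.isEmpty_cons,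
      Bool.false_eq_true, if_false]
    rw [pv_outer_eq, pv_fold_eq]
    set ms := m0 :: rest with hms
    have hKeq : pvK pvSizes ms = (ms.map (pvRk pvSizes)).foldl min pvSizes.length := rfl
    by_cases h : pvK pvSizes ms < pvSizes.length
    · rw [if_pos h]
      have hattained : pvK pvSizes ms ∈ ms.map (pvRk pvSizes) := by
        rcases pv_foldl_min_attained (ms.map (pvRk pvSizes)) pvSizes.length with he | he
        · rw [pvK] at h; omega
        · exact he
      rcases List.mem_map.mp hattained with ⟨x, hx, hxk⟩
      have hsome : (ms.find? (fun m => pvRk pvSizes m == pvK pvSizes ms)).isSome := by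
        rw [List.find?_isSome]
        exact ⟨x, hx, by simp [hxk]⟩
      rcases Option.isSome_iff_exists.mp hsome with ⟨y, hy⟩
      rw [← hKeq, if_pos (hKeq ▸ h)]
      simp [hy]
    · rw [if_neg h, ← hKeq, if_neg h]
      simp [hms, PySem.List.pyGetD_zero_cons]
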